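-- pv_equiv track=rewrite | github.com/jzhang-dev/FEDRANN | SeqNeighbor/fastx_io.py | get_fastx_extension
-- ===== SOURCE A (Python) =====
-- from typing import (
--     Mapping,
--     Sequence,
--     Optional,
--     Collection,
--     MutableMapping,
--     Optional,
--     Iterable,
--     Iterator,
--     overload,
--     Literal,
--     BinaryIO,
--     TextIO,
--     IO,
--     Any,
--     Generator,
--     TypeVar,
--     Generic,
--     cast,
-- )
--
-- def get_fastx_extension(file_path: str) -> str:
--     extension_map: MutableMapping[str, str] = {
--         "fasta": "fasta",
--         "fa": "fasta",
--         "fsa": "fasta",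
--         "fastq": "fastq",
--         "fq": "fastq",
--     }
--     for extension, category in extension_map.items():
--         if file_path.endswith(extension):
--             return category
--         if file_path.endswith(extension + ".gz"):
--             return category + ".gz"
--     else:
--         raise ValueError(f"Invalid FASTX path: {file_path!r}")
-- ===== SOURCE B (Python) =====
-- def get_fastx_extension(file_path: str) -> str:
--     gz = file_path.endswith(".gz")
--     path = file_path[:-3] if gz else file_path
--     if path.endswith(("fasta", "fa", "fsa")):
--         category = "fasta"
--     elif path.endswith(("fastq", "fq")):
--         category = "fastq"
--     else:
--         raise ValueError(f"Invalid FASTX path: {file_path!r}")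
--     return category + ".gz" if gz else category
-- ===== Notes on version B (the rewrite author's own statement) =====
-- stated objective: simpler
-- what changed: B separates the .gz concern (test and strip '.gz' once, re-append once at the end) from a single base-extension classification, instead of A's loop over a five-entry extension map testing both the plain and the '.gz' variant of every entry.
import Mathlib
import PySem

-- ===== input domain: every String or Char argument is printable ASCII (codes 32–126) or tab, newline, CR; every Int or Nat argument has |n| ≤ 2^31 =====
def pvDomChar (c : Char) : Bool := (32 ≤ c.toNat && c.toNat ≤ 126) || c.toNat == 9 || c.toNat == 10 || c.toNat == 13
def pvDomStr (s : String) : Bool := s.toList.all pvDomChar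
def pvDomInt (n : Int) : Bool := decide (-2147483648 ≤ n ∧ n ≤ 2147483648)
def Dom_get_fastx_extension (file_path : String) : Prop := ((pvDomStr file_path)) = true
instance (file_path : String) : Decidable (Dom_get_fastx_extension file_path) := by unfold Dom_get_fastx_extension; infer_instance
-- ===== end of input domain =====

-- B separates the '.gz' concern (strip once, re-append once) from one base-extension
-- classification, instead of A's loop testing the plain and '.gz' variant of each map entry (objective: simpler).

-- ===== PORT A =====
-- the literal dict of A, in insertion order
def fastxExtensionMap : List (String × String) :=
  [("fasta", "fasta"), ("fa", "fasta"), ("fsa", "fasta"), ("fastq", "fastq"), ("fq", "fastq")]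

-- the 'for extension, category in extension_map.items()' loop; none = the ValueError branch
def fastxLoopA (file_path : String) : List (String × String) → Option String
  | [] => none
  | (extension, category) :: rest =>
    if PySem.Str.endswith file_path extension then some category
    else if PySem.Str.endswith file_path (extension ++ ".gz") then some (category ++ ".gz")
    else fastxLoopA file_path rest

def get_fastx_extension (file_path : String) : String :=
  (fastxLoopA file_path fastxExtensionMap).getD ""   -- none = raise ValueError, excluded by Pre_

-- ===== PORT B =====
def get_fastx_extension_alt (file_path : String) : String :=
  let gz := PySem.Str.endswith file_path ".gz"
  let path := if gz then PySem.Str.slice file_path none (some (-3)) else file_path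
  let category? : Option String :=
    if PySem.Str.endswith path "fasta" || PySem.Str.endswith path "fa" || PySem.Str.endswith path "fsa" then
      some "fasta"
    else if PySem.Str.endswith path "fastq" || PySem.Str.endswith path "fq" then
      some "fastq"
    else none   -- raise ValueError, excluded by Pre_
  match category? with
  | some category => if gz then category ++ ".gz" else category
  | none => ""

-- ===== PRECONDITION & SPEC =====
-- Pre_ excludes exactly the inputs on which A raises ValueError (no recognised FASTX suffix).
def Pre_get_fastx_extension (file_path : String) : Prop :=
  PySem.Str.endswith file_path "fasta" = true
  ∨ PySem.Str.endswith file_path "fasta.gz" = true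
  ∨ PySem.Str.endswith file_path "fa" = true
  ∨ PySem.Str.endswith file_path "fa.gz" = true
  ∨ PySem.Str.endswith file_path "fsa" = true
  ∨ PySem.Str.endswith file_path "fsa.gz" = true
  ∨ PySem.Str.endswith file_path "fastq" = true
  ∨ PySem.Str.endswith file_path "fastq.gz" = true
  ∨ PySem.Str.endswith file_path "fq" = true
  ∨ PySem.Str.endswith file_path "fq.gz" = true

instance (file_path : String) : Decidable (Pre_get_fastx_extension file_path) := by
  unfold Pre_get_fastx_extension; infer_instance

def pvWitness_get_fastx_extension : String := "x.fa"

def Spec_get_fastx_extension (file_path : String) (out : String) : Prop := out = get_fastx_extension_alt file_path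
instance (file_path : String) (out : String) : Decidable (Spec_get_fastx_extension file_path out) := by unfold Spec_get_fastx_extension; infer_instance

-- ===== CLAIM (what is proved, stated in full; the proofs are below) =====
def Claim_equal_get_fastx_extension : Prop := ∀ (file_path : String), Dom_get_fastx_extension file_path → Pre_get_fastx_extension file_path → Spec_get_fastx_extension file_path (get_fastx_extension file_path)

-- ===== LEMMAS AND PROOFS =====

theorem pvSuffix_append_iff (p g l : List Char) :
    (p ++ g) <:+ l ↔ g <:+ l ∧ p <:+ l.take (l.length - g.length) := by
  constructor
  · rintro ⟨t, rfl⟩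
    refine ⟨⟨t ++ p, by simp⟩, ?_⟩
    have hlen : (t ++ (p ++ g)).length - g.length = (t ++ p).length := by
      simp [List.length_append]
      omega
    rw [hlen, ← List.append_assoc, List.take_left]
    exact ⟨t, rfl⟩
  · rintro ⟨⟨u, rfl⟩, hp⟩
    have hlen : (u ++ g).length - g.length = u.length := by simp
    rw [hlen, List.take_left] at hp
    rcases hp with ⟨v, rfl⟩
    exact ⟨v, by simp⟩

theorem pvEsw_iff (l p : List Char) : PySem.Chars.endswith l p = true ↔ p <:+ l :=
  PySem.Chars.endswith_iff l p

theorem pvEsw_true {l p : List Char} (h : p <:+ l) : PySem.Chars.endswith l p = true :=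
  (pvEsw_iff l p).mpr h

theorem pvEsw_false (l p q : List Char) (h : p <:+ l)
    (h1 : ¬ p <:+ q) (h2 : ¬ q <:+ p) : PySem.Chars.endswith l q = false := by
  cases hq : PySem.Chars.endswith l q
  · rfl
  · exfalso
    rcases List.suffix_or_suffix_of_suffix h ((pvEsw_iff l q).mp hq) with hc | hc
    · exact h1 hc
    · exact h2 hc

theorem pvSliceNeg3 (l : List Char) :
    PySem.List.slice l none (some (-3)) = l.take (l.length - 3) :=
  PySem.List.slice_to_neg_ofNat l 3 (by omega)

theorem pvEswStrip_iff (l e : List Char) (hg : ['.','g','z'] <:+ l) :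
    PySem.Chars.endswith (PySem.List.slice l none (some (-3))) e = true
      ↔ (e ++ ['.','g','z']) <:+ l := by
  rw [pvEsw_iff, pvSliceNeg3]
  exact ⟨fun h => (pvSuffix_append_iff _ _ _).mpr ⟨hg, h⟩,
         fun h => ((pvSuffix_append_iff _ _ _).mp h).2⟩

theorem pvEswStrip_true {l e : List Char} (h : (e ++ ['.','g','z']) <:+ l) :
    PySem.Chars.endswith (PySem.List.slice l none (some (-3))) e = true :=
  (pvEswStrip_iff l e (List.IsSuffix.trans ⟨e, rfl⟩ h)).mpr h

theorem pvEswStrip_false (l e p : List Char) (hg : ['.','g','z'] <:+ l)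
    (h : p <:+ l)
    (h1 : ¬ p <:+ (e ++ ['.','g','z'])) (h2 : ¬ (e ++ ['.','g','z']) <:+ p) :
    PySem.Chars.endswith (PySem.List.slice l none (some (-3))) e = false := by
  cases he : PySem.Chars.endswith (PySem.List.slice l none (some (-3))) e
  · rfl
  · exfalso
    rcases List.suffix_or_suffix_of_suffix h ((pvEswStrip_iff l e hg).mp he) with hc | hc
    · exact h1 hc
    · exact h2 hc

theorem pvCase_fasta (fp : String) (h : ['f', 'a', 's', 't', 'a'] <:+ fp.toList) :
    get_fastx_extension fp = get_fastx_extension_alt fp := by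
  have f1 : PySem.Chars.endswith fp.toList ['f', 'a', 's', 't', 'a'] = true := pvEsw_true h
  have f3 : PySem.Chars.endswith fp.toList ['f', 'a'] = false := pvEsw_false fp.toList ['f', 'a', 's', 't', 'a'] ['f', 'a'] h (by decide) (by decide)
  have f5 : PySem.Chars.endswith fp.toList ['f', 's', 'a'] = false := pvEsw_false fp.toList ['f', 'a', 's', 't', 'a'] ['f', 's', 'a'] h (by decide) (by decide)
  have fgz : PySem.Chars.endswith fp.toList ['.', 'g', 'z'] = false := pvEsw_false fp.toList ['f', 'a', 's', 't', 'a'] ['.', 'g', 'z'] h (by decide) (by decide)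
  simp [get_fastx_extension, get_fastx_extension_alt, fastxExtensionMap, fastxLoopA,
    f1, f3, f5, fgz]

theorem pvCase_fasta_gz (fp : String) (h : ['f', 'a', 's', 't', 'a', '.', 'g', 'z'] <:+ fp.toList) :
    get_fastx_extension fp = get_fastx_extension_alt fp := by
  have f1 : PySem.Chars.endswith fp.toList ['f', 'a', 's', 't', 'a'] = false := pvEsw_false fp.toList ['f', 'a', 's', 't', 'a', '.', 'g', 'z'] ['f', 'a', 's', 't', 'a'] h (by decide) (by decide)
  have f2 : PySem.Chars.endswith fp.toList ['f', 'a', 's', 't', 'a', '.', 'g', 'z'] = true := pvEsw_true h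
  have hgl : ['.', 'g', 'z'] <:+ fp.toList := List.IsSuffix.trans (by decide) h
  have fgz : PySem.Chars.endswith fp.toList ['.', 'g', 'z'] = true := pvEsw_true hgl
  have g1 : PySem.Chars.endswith (PySem.List.slice fp.toList none (some (-3))) ['f', 'a', 's', 't', 'a'] = true := pvEswStrip_true (show _ ++ ['.','g','z'] <:+ fp.toList from h)
  have g2 : PySem.Chars.endswith (PySem.List.slice fp.toList none (some (-3))) ['f', 'a'] = false := pvEswStrip_false fp.toList ['f', 'a'] ['f', 'a', 's', 't', 'a', '.', 'g', 'z'] hgl h (by decide) (by decide)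
  have g3 : PySem.Chars.endswith (PySem.List.slice fp.toList none (some (-3))) ['f', 's', 'a'] = false := pvEswStrip_false fp.toList ['f', 's', 'a'] ['f', 'a', 's', 't', 'a', '.', 'g', 'z'] hgl h (by decide) (by decide)
  simp [get_fastx_extension, get_fastx_extension_alt, fastxExtensionMap, fastxLoopA,
    f1, f2, fgz, g1, g2, g3]

theorem pvCase_fa (fp : String) (h : ['f', 'a'] <:+ fp.toList) :
    get_fastx_extension fp = get_fastx_extension_alt fp := by
  have f1 : PySem.Chars.endswith fp.toList ['f', 'a', 's', 't', 'a'] = false := pvEsw_false fp.toList ['f', 'a'] ['f', 'a', 's', 't', 'a'] h (by decide) (by decide)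
  have f2 : PySem.Chars.endswith fp.toList ['f', 'a', 's', 't', 'a', '.', 'g', 'z'] = false := pvEsw_false fp.toList ['f', 'a'] ['f', 'a', 's', 't', 'a', '.', 'g', 'z'] h (by decide) (by decide)
  have f3 : PySem.Chars.endswith fp.toList ['f', 'a'] = true := pvEsw_true h
  have f5 : PySem.Chars.endswith fp.toList ['f', 's', 'a'] = false := pvEsw_false fp.toList ['f', 'a'] ['f', 's', 'a'] h (by decide) (by decide)
  have fgz : PySem.Chars.endswith fp.toList ['.', 'g', 'z'] = false := pvEsw_false fp.toList ['f', 'a'] ['.', 'g', 'z'] h (by decide) (by decide)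
  simp [get_fastx_extension, get_fastx_extension_alt, fastxExtensionMap, fastxLoopA,
    f1, f2, f3, f5, fgz]

theorem pvCase_fa_gz (fp : String) (h : ['f', 'a', '.', 'g', 'z'] <:+ fp.toList) :
    get_fastx_extension fp = get_fastx_extension_alt fp := by
  have f1 : PySem.Chars.endswith fp.toList ['f', 'a', 's', 't', 'a'] = false := pvEsw_false fp.toList ['f', 'a', '.', 'g', 'z'] ['f', 'a', 's', 't', 'a'] h (by decide) (by decide)
  have f2 : PySem.Chars.endswith fp.toList ['f', 'a', 's', 't', 'a', '.', 'g', 'z'] = false := pvEsw_false fp.toList ['f', 'a', '.', 'g', 'z'] ['f', 'a', 's', 't', 'a', '.', 'g', 'z'] h (by decide) (by decide)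
  have f3 : PySem.Chars.endswith fp.toList ['f', 'a'] = false := pvEsw_false fp.toList ['f', 'a', '.', 'g', 'z'] ['f', 'a'] h (by decide) (by decide)
  have f4 : PySem.Chars.endswith fp.toList ['f', 'a', '.', 'g', 'z'] = true := pvEsw_true h
  have hgl : ['.', 'g', 'z'] <:+ fp.toList := List.IsSuffix.trans (by decide) h
  have fgz : PySem.Chars.endswith fp.toList ['.', 'g', 'z'] = true := pvEsw_true hgl
  have g1 : PySem.Chars.endswith (PySem.List.slice fp.toList none (some (-3))) ['f', 'a', 's', 't', 'a'] = false := pvEswStrip_false fp.toList ['f', 'a', 's', 't', 'a'] ['f', 'a', '.', 'g', 'z'] hgl h (by decide) (by decide)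
  have g2 : PySem.Chars.endswith (PySem.List.slice fp.toList none (some (-3))) ['f', 'a'] = true := pvEswStrip_true (show _ ++ ['.','g','z'] <:+ fp.toList from h)
  have g3 : PySem.Chars.endswith (PySem.List.slice fp.toList none (some (-3))) ['f', 's', 'a'] = false := pvEswStrip_false fp.toList ['f', 's', 'a'] ['f', 'a', '.', 'g', 'z'] hgl h (by decide) (by decide)
  simp [get_fastx_extension, get_fastx_extension_alt, fastxExtensionMap, fastxLoopA,
    f1, f2, f3, f4, fgz, g1, g2, g3]

theorem pvCase_fsa (fp : String) (h : ['f', 's', 'a'] <:+ fp.toList) :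
    get_fastx_extension fp = get_fastx_extension_alt fp := by
  have f1 : PySem.Chars.endswith fp.toList ['f', 'a', 's', 't', 'a'] = false := pvEsw_false fp.toList ['f', 's', 'a'] ['f', 'a', 's', 't', 'a'] h (by decide) (by decide)
  have f2 : PySem.Chars.endswith fp.toList ['f', 'a', 's', 't', 'a', '.', 'g', 'z'] = false := pvEsw_false fp.toList ['f', 's', 'a'] ['f', 'a', 's', 't', 'a', '.', 'g', 'z'] h (by decide) (by decide)
  have f3 : PySem.Chars.endswith fp.toList ['f', 'a'] = false := pvEsw_false fp.toList ['f', 's', 'a'] ['f', 'a'] h (by decide) (by decide)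
  have f4 : PySem.Chars.endswith fp.toList ['f', 'a', '.', 'g', 'z'] = false := pvEsw_false fp.toList ['f', 's', 'a'] ['f', 'a', '.', 'g', 'z'] h (by decide) (by decide)
  have f5 : PySem.Chars.endswith fp.toList ['f', 's', 'a'] = true := pvEsw_true h
  have fgz : PySem.Chars.endswith fp.toList ['.', 'g', 'z'] = false := pvEsw_false fp.toList ['f', 's', 'a'] ['.', 'g', 'z'] h (by decide) (by decide)
  simp [get_fastx_extension, get_fastx_extension_alt, fastxExtensionMap, fastxLoopA,
    f1, f2, f3, f4, f5, fgz]

theorem pvCase_fsa_gz (fp : String) (h : ['f', 's', 'a', '.', 'g', 'z'] <:+ fp.toList) :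
    get_fastx_extension fp = get_fastx_extension_alt fp := by
  have f1 : PySem.Chars.endswith fp.toList ['f', 'a', 's', 't', 'a'] = false := pvEsw_false fp.toList ['f', 's', 'a', '.', 'g', 'z'] ['f', 'a', 's', 't', 'a'] h (by decide) (by decide)
  have f2 : PySem.Chars.endswith fp.toList ['f', 'a', 's', 't', 'a', '.', 'g', 'z'] = false := pvEsw_false fp.toList ['f', 's', 'a', '.', 'g', 'z'] ['f', 'a', 's', 't', 'a', '.', 'g', 'z'] h (by decide) (by decide)
  have f3 : PySem.Chars.endswith fp.toList ['f', 'a'] = false := pvEsw_false fp.toList ['f', 's', 'a', '.', 'g', 'z'] ['f', 'a'] h (by decide) (by decide)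
  have f4 : PySem.Chars.endswith fp.toList ['f', 'a', '.', 'g', 'z'] = false := pvEsw_false fp.toList ['f', 's', 'a', '.', 'g', 'z'] ['f', 'a', '.', 'g', 'z'] h (by decide) (by decide)
  have f5 : PySem.Chars.endswith fp.toList ['f', 's', 'a'] = false := pvEsw_false fp.toList ['f', 's', 'a', '.', 'g', 'z'] ['f', 's', 'a'] h (by decide) (by decide)
  have f6 : PySem.Chars.endswith fp.toList ['f', 's', 'a', '.', 'g', 'z'] = true := pvEsw_true h
  have hgl : ['.', 'g', 'z'] <:+ fp.toList := List.IsSuffix.trans (by decide) h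
  have fgz : PySem.Chars.endswith fp.toList ['.', 'g', 'z'] = true := pvEsw_true hgl
  have g1 : PySem.Chars.endswith (PySem.List.slice fp.toList none (some (-3))) ['f', 'a', 's', 't', 'a'] = false := pvEswStrip_false fp.toList ['f', 'a', 's', 't', 'a'] ['f', 's', 'a', '.', 'g', 'z'] hgl h (by decide) (by decide)
  have g2 : PySem.Chars.endswith (PySem.List.slice fp.toList none (some (-3))) ['f', 'a'] = false := pvEswStrip_false fp.toList ['f', 'a'] ['f', 's', 'a', '.', 'g', 'z'] hgl h (by decide) (by decide)
  have g3 : PySem.Chars.endswith (PySem.List.slice fp.toList none (some (-3))) ['f', 's', 'a'] = true := pvEswStrip_true (show _ ++ ['.','g','z'] <:+ fp.toList from h)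
  simp [get_fastx_extension, get_fastx_extension_alt, fastxExtensionMap, fastxLoopA,
    f1, f2, f3, f4, f5, f6, fgz, g1, g2, g3]

theorem pvCase_fastq (fp : String) (h : ['f', 'a', 's', 't', 'q'] <:+ fp.toList) :
    get_fastx_extension fp = get_fastx_extension_alt fp := by
  have f1 : PySem.Chars.endswith fp.toList ['f', 'a', 's', 't', 'a'] = false := pvEsw_false fp.toList ['f', 'a', 's', 't', 'q'] ['f', 'a', 's', 't', 'a'] h (by decide) (by decide)
  have f2 : PySem.Chars.endswith fp.toList ['f', 'a', 's', 't', 'a', '.', 'g', 'z'] = false := pvEsw_false fp.toList ['f', 'a', 's', 't', 'q'] ['f', 'a', 's', 't', 'a', '.', 'g', 'z'] h (by decide) (by decide)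
  have f3 : PySem.Chars.endswith fp.toList ['f', 'a'] = false := pvEsw_false fp.toList ['f', 'a', 's', 't', 'q'] ['f', 'a'] h (by decide) (by decide)
  have f4 : PySem.Chars.endswith fp.toList ['f', 'a', '.', 'g', 'z'] = false := pvEsw_false fp.toList ['f', 'a', 's', 't', 'q'] ['f', 'a', '.', 'g', 'z'] h (by decide) (by decide)
  have f5 : PySem.Chars.endswith fp.toList ['f', 's', 'a'] = false := pvEsw_false fp.toList ['f', 'a', 's', 't', 'q'] ['f', 's', 'a'] h (by decide) (by decide)
  have f6 : PySem.Chars.endswith fp.toList ['f', 's', 'a', '.', 'g', 'z'] = false := pvEsw_false fp.toList ['f', 'a', 's', 't', 'q'] ['f', 's', 'a', '.', 'g', 'z'] h (by decide) (by decide)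
  have f7 : PySem.Chars.endswith fp.toList ['f', 'a', 's', 't', 'q'] = true := pvEsw_true h
  have f9 : PySem.Chars.endswith fp.toList ['f', 'q'] = false := pvEsw_false fp.toList ['f', 'a', 's', 't', 'q'] ['f', 'q'] h (by decide) (by decide)
  have fgz : PySem.Chars.endswith fp.toList ['.', 'g', 'z'] = false := pvEsw_false fp.toList ['f', 'a', 's', 't', 'q'] ['.', 'g', 'z'] h (by decide) (by decide)
  simp [get_fastx_extension, get_fastx_extension_alt, fastxExtensionMap, fastxLoopA,
    f1, f2, f3, f4, f5, f6, f7, f9, fgz]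

theorem pvCase_fastq_gz (fp : String) (h : ['f', 'a', 's', 't', 'q', '.', 'g', 'z'] <:+ fp.toList) :
    get_fastx_extension fp = get_fastx_extension_alt fp := by
  have f1 : PySem.Chars.endswith fp.toList ['f', 'a', 's', 't', 'a'] = false := pvEsw_false fp.toList ['f', 'a', 's', 't', 'q', '.', 'g', 'z'] ['f', 'a', 's', 't', 'a'] h (by decide) (by decide)
  have f2 : PySem.Chars.endswith fp.toList ['f', 'a', 's', 't', 'a', '.', 'g', 'z'] = false := pvEsw_false fp.toList ['f', 'a', 's', 't', 'q', '.', 'g', 'z'] ['f', 'a', 's', 't', 'a', '.', 'g', 'z'] h (by decide) (by decide)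
  have f3 : PySem.Chars.endswith fp.toList ['f', 'a'] = false := pvEsw_false fp.toList ['f', 'a', 's', 't', 'q', '.', 'g', 'z'] ['f', 'a'] h (by decide) (by decide)
  have f4 : PySem.Chars.endswith fp.toList ['f', 'a', '.', 'g', 'z'] = false := pvEsw_false fp.toList ['f', 'a', 's', 't', 'q', '.', 'g', 'z'] ['f', 'a', '.', 'g', 'z'] h (by decide) (by decide)
  have f5 : PySem.Chars.endswith fp.toList ['f', 's', 'a'] = false := pvEsw_false fp.toList ['f', 'a', 's', 't', 'q', '.', 'g', 'z'] ['f', 's', 'a'] h (by decide) (by decide)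
  have f6 : PySem.Chars.endswith fp.toList ['f', 's', 'a', '.', 'g', 'z'] = false := pvEsw_false fp.toList ['f', 'a', 's', 't', 'q', '.', 'g', 'z'] ['f', 's', 'a', '.', 'g', 'z'] h (by decide) (by decide)
  have f7 : PySem.Chars.endswith fp.toList ['f', 'a', 's', 't', 'q'] = false := pvEsw_false fp.toList ['f', 'a', 's', 't', 'q', '.', 'g', 'z'] ['f', 'a', 's', 't', 'q'] h (by decide) (by decide)
  have f8 : PySem.Chars.endswith fp.toList ['f', 'a', 's', 't', 'q', '.', 'g', 'z'] = true := pvEsw_true h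
  have hgl : ['.', 'g', 'z'] <:+ fp.toList := List.IsSuffix.trans (by decide) h
  have fgz : PySem.Chars.endswith fp.toList ['.', 'g', 'z'] = true := pvEsw_true hgl
  have g1 : PySem.Chars.endswith (PySem.List.slice fp.toList none (some (-3))) ['f', 'a', 's', 't', 'a'] = false := pvEswStrip_false fp.toList ['f', 'a', 's', 't', 'a'] ['f', 'a', 's', 't', 'q', '.', 'g', 'z'] hgl h (by decide) (by decide)
  have g2 : PySem.Chars.endswith (PySem.List.slice fp.toList none (some (-3))) ['f', 'a'] = false := pvEswStrip_false fp.toList ['f', 'a'] ['f', 'a', 's', 't', 'q', '.', 'g', 'z'] hgl h (by decide) (by decide)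
  have g3 : PySem.Chars.endswith (PySem.List.slice fp.toList none (some (-3))) ['f', 's', 'a'] = false := pvEswStrip_false fp.toList ['f', 's', 'a'] ['f', 'a', 's', 't', 'q', '.', 'g', 'z'] hgl h (by decide) (by decide)
  have g4 : PySem.Chars.endswith (PySem.List.slice fp.toList none (some (-3))) ['f', 'a', 's', 't', 'q'] = true := pvEswStrip_true (show _ ++ ['.','g','z'] <:+ fp.toList from h)
  have g5 : PySem.Chars.endswith (PySem.List.slice fp.toList none (some (-3))) ['f', 'q'] = false := pvEswStrip_false fp.toList ['f', 'q'] ['f', 'a', 's', 't', 'q', '.', 'g', 'z'] hgl h (by decide) (by decide)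
  simp [get_fastx_extension, get_fastx_extension_alt, fastxExtensionMap, fastxLoopA,
    f1, f2, f3, f4, f5, f6, f7, f8, fgz, g1, g2, g3, g4, g5]

theorem pvCase_fq (fp : String) (h : ['f', 'q'] <:+ fp.toList) :
    get_fastx_extension fp = get_fastx_extension_alt fp := by
  have f1 : PySem.Chars.endswith fp.toList ['f', 'a', 's', 't', 'a'] = false := pvEsw_false fp.toList ['f', 'q'] ['f', 'a', 's', 't', 'a'] h (by decide) (by decide)
  have f2 : PySem.Chars.endswith fp.toList ['f', 'a', 's', 't', 'a', '.', 'g', 'z'] = false := pvEsw_false fp.toList ['f', 'q'] ['f', 'a', 's', 't', 'a', '.', 'g', 'z'] h (by decide) (by decide)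
  have f3 : PySem.Chars.endswith fp.toList ['f', 'a'] = false := pvEsw_false fp.toList ['f', 'q'] ['f', 'a'] h (by decide) (by decide)
  have f4 : PySem.Chars.endswith fp.toList ['f', 'a', '.', 'g', 'z'] = false := pvEsw_false fp.toList ['f', 'q'] ['f', 'a', '.', 'g', 'z'] h (by decide) (by decide)
  have f5 : PySem.Chars.endswith fp.toList ['f', 's', 'a'] = false := pvEsw_false fp.toList ['f', 'q'] ['f', 's', 'a'] h (by decide) (by decide)
  have f6 : PySem.Chars.endswith fp.toList ['f', 's', 'a', '.', 'g', 'z'] = false := pvEsw_false fp.toList ['f', 'q'] ['f', 's', 'a', '.', 'g', 'z'] h (by decide) (by decide)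
  have f7 : PySem.Chars.endswith fp.toList ['f', 'a', 's', 't', 'q'] = false := pvEsw_false fp.toList ['f', 'q'] ['f', 'a', 's', 't', 'q'] h (by decide) (by decide)
  have f8 : PySem.Chars.endswith fp.toList ['f', 'a', 's', 't', 'q', '.', 'g', 'z'] = false := pvEsw_false fp.toList ['f', 'q'] ['f', 'a', 's', 't', 'q', '.', 'g', 'z'] h (by decide) (by decide)
  have f9 : PySem.Chars.endswith fp.toList ['f', 'q'] = true := pvEsw_true h
  have fgz : PySem.Chars.endswith fp.toList ['.', 'g', 'z'] = false := pvEsw_false fp.toList ['f', 'q'] ['.', 'g', 'z'] h (by decide) (by decide)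
  simp [get_fastx_extension, get_fastx_extension_alt, fastxExtensionMap, fastxLoopA,
    f1, f2, f3, f4, f5, f6, f7, f8, f9, fgz]

theorem pvCase_fq_gz (fp : String) (h : ['f', 'q', '.', 'g', 'z'] <:+ fp.toList) :
    get_fastx_extension fp = get_fastx_extension_alt fp := by
  have f1 : PySem.Chars.endswith fp.toList ['f', 'a', 's', 't', 'a'] = false := pvEsw_false fp.toList ['f', 'q', '.', 'g', 'z'] ['f', 'a', 's', 't', 'a'] h (by decide) (by decide)
  have f2 : PySem.Chars.endswith fp.toList ['f', 'a', 's', 't', 'a', '.', 'g', 'z'] = false := pvEsw_false fp.toList ['f', 'q', '.', 'g', 'z'] ['f', 'a', 's', 't', 'a', '.', 'g', 'z'] h (by decide) (by decide)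
  have f3 : PySem.Chars.endswith fp.toList ['f', 'a'] = false := pvEsw_false fp.toList ['f', 'q', '.', 'g', 'z'] ['f', 'a'] h (by decide) (by decide)
  have f4 : PySem.Chars.endswith fp.toList ['f', 'a', '.', 'g', 'z'] = false := pvEsw_false fp.toList ['f', 'q', '.', 'g', 'z'] ['f', 'a', '.', 'g', 'z'] h (by decide) (by decide)
  have f5 : PySem.Chars.endswith fp.toList ['f', 's', 'a'] = false := pvEsw_false fp.toList ['f', 'q', '.', 'g', 'z'] ['f', 's', 'a'] h (by decide) (by decide)
  have f6 : PySem.Chars.endswith fp.toList ['f', 's', 'a', '.', 'g', 'z'] = false := pvEsw_false fp.toList ['f', 'q', '.', 'g', 'z'] ['f', 's', 'a', '.', 'g', 'z'] h (by decide) (by decide)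
  have f7 : PySem.Chars.endswith fp.toList ['f', 'a', 's', 't', 'q'] = false := pvEsw_false fp.toList ['f', 'q', '.', 'g', 'z'] ['f', 'a', 's', 't', 'q'] h (by decide) (by decide)
  have f8 : PySem.Chars.endswith fp.toList ['f', 'a', 's', 't', 'q', '.', 'g', 'z'] = false := pvEsw_false fp.toList ['f', 'q', '.', 'g', 'z'] ['f', 'a', 's', 't', 'q', '.', 'g', 'z'] h (by decide) (by decide)
  have f9 : PySem.Chars.endswith fp.toList ['f', 'q'] = false := pvEsw_false fp.toList ['f', 'q', '.', 'g', 'z'] ['f', 'q'] h (by decide) (by decide)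
  have f10 : PySem.Chars.endswith fp.toList ['f', 'q', '.', 'g', 'z'] = true := pvEsw_true h
  have hgl : ['.', 'g', 'z'] <:+ fp.toList := List.IsSuffix.trans (by decide) h
  have fgz : PySem.Chars.endswith fp.toList ['.', 'g', 'z'] = true := pvEsw_true hgl
  have g1 : PySem.Chars.endswith (PySem.List.slice fp.toList none (some (-3))) ['f', 'a', 's', 't', 'a'] = false := pvEswStrip_false fp.toList ['f', 'a', 's', 't', 'a'] ['f', 'q', '.', 'g', 'z'] hgl h (by decide) (by decide)
  have g2 : PySem.Chars.endswith (PySem.List.slice fp.toList none (some (-3))) ['f', 'a'] = false := pvEswStrip_false fp.toList ['f', 'a'] ['f', 'q', '.', 'g', 'z'] hgl h (by decide) (by decide)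
  have g3 : PySem.Chars.endswith (PySem.List.slice fp.toList none (some (-3))) ['f', 's', 'a'] = false := pvEswStrip_false fp.toList ['f', 's', 'a'] ['f', 'q', '.', 'g', 'z'] hgl h (by decide) (by decide)
  have g4 : PySem.Chars.endswith (PySem.List.slice fp.toList none (some (-3))) ['f', 'a', 's', 't', 'q'] = false := pvEswStrip_false fp.toList ['f', 'a', 's', 't', 'q'] ['f', 'q', '.', 'g', 'z'] hgl h (by decide) (by decide)
  have g5 : PySem.Chars.endswith (PySem.List.slice fp.toList none (some (-3))) ['f', 'q'] = true := pvEswStrip_true (show _ ++ ['.','g','z'] <:+ fp.toList from h)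
  simp [get_fastx_extension, get_fastx_extension_alt, fastxExtensionMap, fastxLoopA,
    f1, f2, f3, f4, f5, f6, f7, f8, f9, f10, fgz, g1, g2, g3, g4, g5]

-- ===== VERDICT (by name: the statement is the Claim_ definition above) =====
theorem get_fastx_extension_spec : Claim_equal_get_fastx_extension := by
  intro fp _ hpre
  unfold Spec_get_fastx_extension
  unfold Pre_get_fastx_extension at hpre
  simp only [PySem.Str.endswith_eq] at hpre
  rcases hpre with h | h | h | h | h | h | h | h | h | h
  · exact pvCase_fasta fp ((pvEsw_iff fp.toList _).mp h)
  · exact pvCase_fasta_gz fp ((pvEsw_iff fp.toList _).mp h)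
  · exact pvCase_fa fp ((pvEsw_iff fp.toList _).mp h)
  · exact pvCase_fa_gz fp ((pvEsw_iff fp.toList _).mp h)
  · exact pvCase_fsa fp ((pvEsw_iff fp.toList _).mp h)
  · exact pvCase_fsa_gz fp ((pvEsw_iff fp.toList _).mp h)
  · exact pvCase_fastq fp ((pvEsw_iff fp.toList _).mp h)
  · exact pvCase_fastq_gz fp ((pvEsw_iff fp.toList _).mp h)
  · exact pvCase_fq fp ((pvEsw_iff fp.toList _).mp h)
  · exact pvCase_fq_gz fp ((pvEsw_iff fp.toList _).mp h)
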